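-- pv_equiv track=rewrite | github.com/LongWeeeeeee/bets | base/test_filters.py | is_early_match_stable8k_4min
-- ===== SOURCE A (Python) =====
-- from typing import Tuple, Optional, Dict, Any
--
-- def is_early_match_stable8k_4min(match: Dict) -> Tuple[bool, Optional[str]]:
--     """Stable lead >= 8k минимум 4 минуты подряд на 15-30."""
--     leads = match.get('radiantNetworthLeads', [])
--     duration = len(leads)
--
--     if duration < 30 or duration > 50:
--         return False, None
--
--     consecutive_r = 0
--     consecutive_d = 0
--
--     for i in range(15, min(30, duration)):
--         if leads[i] >= 8000:
--             consecutive_r += 1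
--             consecutive_d = 0
--             if consecutive_r >= 4:
--                 return True, 'radiant'
--         elif leads[i] <= -8000:
--             consecutive_d += 1
--             consecutive_r = 0
--             if consecutive_d >= 4:
--                 return True, 'dire'
--         else:
--             consecutive_r = 0
--             consecutive_d = 0
--
--     return False, None
-- ===== SOURCE B (Python) =====
-- def _sign_key(x):
--     return 1 if x >= 8000 else (-1 if x <= -8000 else 0)
--
--
-- def _runs(keys):
--     """Run-length encode: maximal consecutive runs as (key, length), in order."""
--     if not keys:
--         return []
--     out = []
--     cur, n = keys[0], 1
--     for k in keys[1:]:
--         if k == cur: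
--             n += 1
--         else:
--             out.append((cur, n))
--             cur, n = k, 1
--     out.append((cur, n))
--     return out
--
--
-- def is_early_match_stable8k_4min(match):
--     """Stable lead >= 8k минимум 4 минуты подряд на 15-30."""
--     leads = match.get('radiantNetworthLeads', [])
--     duration = len(leads)
--     if duration < 30 or duration > 50:
--         return False, None
--     for key, n in _runs([_sign_key(x) for x in leads[15:30]]):
--         if key != 0 and n >= 4:
--             return True, 'radiant' if key == 1 else 'dire'
--     return False, None
-- ===== Notes on version B (the rewrite author's own statement) =====
-- stated objective: alternative
-- what changed: Replaces the single element loop threading two mutually-resetting counters with a two-phase pass: map the window to sign keys, run-length encode it into maximal runs, then return on the first nonzero run of length >= 4.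
import Mathlib
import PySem

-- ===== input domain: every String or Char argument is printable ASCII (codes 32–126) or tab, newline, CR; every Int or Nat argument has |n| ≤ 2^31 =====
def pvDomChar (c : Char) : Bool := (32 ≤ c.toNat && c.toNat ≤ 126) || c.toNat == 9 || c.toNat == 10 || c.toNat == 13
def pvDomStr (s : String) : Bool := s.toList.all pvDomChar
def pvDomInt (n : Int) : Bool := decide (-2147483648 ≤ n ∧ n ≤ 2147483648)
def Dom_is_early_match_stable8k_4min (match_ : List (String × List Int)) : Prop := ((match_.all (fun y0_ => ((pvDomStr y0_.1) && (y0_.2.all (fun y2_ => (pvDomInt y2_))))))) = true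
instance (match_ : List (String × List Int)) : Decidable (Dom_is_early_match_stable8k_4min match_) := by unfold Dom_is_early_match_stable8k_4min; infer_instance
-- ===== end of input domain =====

-- B differs from A by decomposition: A threads two mutually-resetting counters through one
-- element loop; B maps the window to sign keys, run-length encodes it, then scans the runs.

-- ===== PORT A =====
-- the 'for i in range(15, min(30, duration))' loop, as structural recursion over the index
-- list with the two counters as state; leads[i]: the index is always in range whenever the
-- loop runs (the duration guard ensures length ≥ 30 > i), so the .getD 0 default is unreachable
def aLoop (leads : List Int) : List Int → Int → Int → Bool × Option String
  | [], _, _ => (false, none)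
  | i :: is, consecutive_r, consecutive_d =>
    let x := (PySem.List.pyGet? leads i).getD 0
    if x ≥ 8000 then
      if consecutive_r + 1 ≥ 4 then (true, some "radiant")
      else aLoop leads is (consecutive_r + 1) 0
    else if x ≤ -8000 then
      if consecutive_d + 1 ≥ 4 then (true, some "dire")
      else aLoop leads is 0 (consecutive_d + 1)
    else aLoop leads is 0 0

def is_early_match_stable8k_4min (match_ : List (String × List Int)) : Bool × Option String :=
  let leads := (PySem.Dict.mk match_).getD "radiantNetworthLeads" []
  let duration : Int := leads.length
  if duration < 30 ∨ duration > 50 then (false, none)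
  else aLoop leads (PySem.List.pyRange 15 (min 30 duration) 1) 0 0

-- ===== PORT B =====
def signKey (x : Int) : Int := if x ≥ 8000 then 1 else if x ≤ -8000 then -1 else 0

-- _runs: the left-to-right run-length-encoding loop, carrying the open run (cur, n)
def runsAux : List Int → Int → Nat → List (Int × Nat)
  | [], cur, n => [(cur, n)]
  | k :: ks, cur, n => if k = cur then runsAux ks cur (n + 1) else (cur, n) :: runsAux ks k 1

def runs : List Int → List (Int × Nat)
  | [] => []
  | k :: ks => runsAux ks k 1

-- the final 'for key, n in _runs(...)' scan
def findRun : List (Int × Nat) → Bool × Option String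
  | [] => (false, none)
  | (key, n) :: rest =>
    if key ≠ 0 ∧ n ≥ 4 then (true, if key = 1 then some "radiant" else some "dire")
    else findRun rest

def is_early_match_stable8k_4min_alt (match_ : List (String × List Int)) : Bool × Option String :=
  let leads := (PySem.Dict.mk match_).getD "radiantNetworthLeads" []
  let duration : Int := leads.length
  if duration < 30 ∨ duration > 50 then (false, none)
  else findRun (runs ((PySem.List.slice leads (some 15) (some 30)).map signKey))

-- ===== PRECONDITION & SPEC =====
def Spec_is_early_match_stable8k_4min (match_ : List (String × List Int)) (out : Bool × Option String) : Prop := out = is_early_match_stable8k_4min_alt match_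
instance (match_ : List (String × List Int)) (out : Bool × Option String) : Decidable (Spec_is_early_match_stable8k_4min match_ out) := by unfold Spec_is_early_match_stable8k_4min; infer_instance

-- ===== CLAIM (what is proved, stated in full; the proofs are below) =====
def Claim_equal_is_early_match_stable8k_4min : Prop := ∀ (match_ : List (String × List Int)), Dom_is_early_match_stable8k_4min match_ → Spec_is_early_match_stable8k_4min match_ (is_early_match_stable8k_4min match_)

-- ===== LEMMAS AND PROOFS =====

-- A's loop over the window ELEMENTS (the index bookkeeping removed)
def wLoop : List Int → Int → Int → Bool × Option String
  | [], _, _ => (false, none)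
  | x :: xs, cr, cd =>
    if x ≥ 8000 then (if cr + 1 ≥ 4 then (true, some "radiant") else wLoop xs (cr + 1) 0)
    else if x ≤ -8000 then (if cd + 1 ≥ 4 then (true, some "dire") else wLoop xs 0 (cd + 1))
    else wLoop xs 0 0

-- the indexed loop over range(a, a+d) equals the element loop over the corresponding window
theorem aLoop_range (leads : List Int) (d : Nat) : ∀ (a : Nat) (cr cd : Int),
    a + d ≤ leads.length →
    aLoop leads (PySem.List.pyRange (a : Int) ((a : Int) + (d : Int)) 1) cr cd
      = wLoop ((leads.drop a).take d) cr cd := by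
  induction d with
  | zero =>
    intro a cr cd _
    simp [aLoop, wLoop]
  | succ d ih =>
    intro a cr cd hle
    have ha : a < leads.length := by omega
    have hcons : PySem.List.pyRange (a : Int) ((a : Int) + ((d + 1 : Nat) : Int)) 1
        = (a : Int) :: PySem.List.pyRange ((a : Int) + 1) ((a : Int) + ((d + 1 : Nat) : Int)) 1 := by
      apply PySem.List.pyRange_one_cons
      push_cast; omega
    have hget : (PySem.List.pyGet? leads (a : Int)).getD 0 = leads[a] := by
      simp [PySem.List.pyGet?_natCast, List.getElem?_eq_getElem ha]
    have hwin : (leads.drop a).take (d + 1) = leads[a] :: ((leads.drop (a + 1)).take d) := by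
      rw [List.drop_eq_getElem_cons ha, List.take_succ_cons]
    have hbounds : ((a : Int) + 1) = ((a + 1 : Nat) : Int) := by push_cast; ring
    have hrange : PySem.List.pyRange ((a : Int) + 1) ((a : Int) + ((d + 1 : Nat) : Int)) 1
        = PySem.List.pyRange ((a + 1 : Nat) : Int) (((a + 1 : Nat) : Int) + (d : Int)) 1 := by
      rw [hbounds]; congr 1; push_cast; ring
    rw [hcons, hwin]
    simp only [aLoop, wLoop, hget, hrange]
    split_ifs with h1 h2 h3 h4 <;>
      first
        | rfl
        | exact ih (a + 1) _ _ (by omega)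

-- a run already ≥ 4 long with nonzero key fires no matter what follows
theorem findRun_pending (ks : List Int) : ∀ (k : Int) (n : Nat), k ≠ 0 → 4 ≤ n →
    findRun (runsAux ks k n) = (true, if k = 1 then some "radiant" else some "dire") := by
  induction ks with
  | nil => intro k n hk hn; simp [runsAux, findRun, hk, hn]
  | cons x xs ih =>
    intro k n hk hn
    by_cases hx : x = k
    · simp only [runsAux, if_pos hx]
      exact ih k (n + 1) hk (by omega)
    · simp [runsAux, hx, findRun, hk, hn]

-- loop invariant: counters (cr, cd) encode the open run (k, n)
theorem wLoop_inv (xs : List Int) : ∀ (k : Int) (n : Nat),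
    (k = 1 ∨ k = -1 ∨ k = 0) → 1 ≤ n → (k ≠ 0 → n < 4) →
    wLoop xs (if k = 1 then (n : Int) else 0) (if k = -1 then (n : Int) else 0)
      = findRun (runsAux (xs.map signKey) k n) := by
  induction xs with
  | nil =>
    intro k n hk h1 h4
    rcases hk with h | h | h <;> subst h <;>
      simp_all [wLoop, runsAux, findRun]
  | cons x xs ih =>
    intro k n hk h1 h4
    by_cases hp : x ≥ 8000
    · have hs : signKey x = 1 := by simp [signKey, hp]
      by_cases hk1 : k = 1
      · subst hk1
        by_cases hn : n = 3
        · subst hn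
          simp only [wLoop, if_pos hp, List.map_cons, hs, runsAux, ite_true]
          rw [if_pos (by norm_num : ((3:Nat):Int)+1 ≥ 4), findRun_pending _ 1 (3+1) (by norm_num) (by norm_num)]
          norm_num
        · have hn4 : n < 4 := h4 (by norm_num)
          simp only [wLoop, if_pos hp, List.map_cons, hs, runsAux, ite_true]
          rw [if_neg (by omega : ¬ ((n:Int) + 1 ≥ 4))]
          have := ih 1 (n + 1) (by norm_num) (by omega) (fun _ => by omega)
          simp only [ite_true, if_neg (by norm_num : (1 : Int) ≠ -1)] at this
          rw [show ((n : Int) + 1) = ((n + 1 : Nat) : Int) from by push_cast; ring]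
          exact this
      · have hcr : (if k = 1 then (n : Int) else 0) = 0 := if_neg hk1
        simp only [wLoop, if_pos hp, hcr, List.map_cons, hs, runsAux]
        rw [if_neg (by norm_num), if_neg (fun h => hk1 h.symm), findRun]
        have hskip : ¬ (k ≠ 0 ∧ n ≥ 4) := by
          rintro ⟨hk0, hn4⟩; exact absurd (h4 hk0) (by omega)
        rw [if_neg hskip]
        have := ih 1 1 (by norm_num) (by norm_num) (fun _ => by norm_num)
        simp only [ite_true, if_neg (by norm_num : (1 : Int) ≠ -1)] at this
        rcases hk with h | h | h
        · exact absurd h hk1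
        all_goals subst h; simpa using this
    · by_cases hm : x ≤ -8000
      · have hs : signKey x = -1 := by simp [signKey, hp, hm]
        by_cases hk1 : k = -1
        · subst hk1
          by_cases hn : n = 3
          · subst hn
            simp only [wLoop, if_neg hp, if_pos hm, if_neg (by norm_num : (-1 : Int) ≠ 1),
              List.map_cons, hs, runsAux, ite_true]
            rw [if_pos (by norm_num : ((3:Nat):Int)+1 ≥ 4), findRun_pending _ (-1) (3+1) (by norm_num) (by norm_num)]
            norm_num
          · have hn4 : n < 4 := h4 (by norm_num)
            simp only [wLoop, if_neg hp, if_pos hm, if_neg (by norm_num : (-1 : Int) ≠ 1),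
              List.map_cons, hs, runsAux, ite_true]
            rw [if_neg (by omega : ¬ ((n:Int) + 1 ≥ 4))]
            have := ih (-1) (n + 1) (by norm_num) (by omega) (fun _ => by omega)
            simp only [ite_true, if_neg (by norm_num : (-1 : Int) ≠ 1)] at this
            rw [show ((n : Int) + 1) = ((n + 1 : Nat) : Int) from by push_cast; ring]
            exact this
        · have hcd : (if k = -1 then (n : Int) else 0) = 0 := if_neg hk1
          simp only [wLoop, if_neg hp, if_pos hm, hcd, List.map_cons, hs, runsAux]
          rw [if_neg (by norm_num), if_neg (fun h => hk1 h.symm), findRun]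
          have hskip : ¬ (k ≠ 0 ∧ n ≥ 4) := by
            rintro ⟨hk0, hn4⟩; exact absurd (h4 hk0) (by omega)
          rw [if_neg hskip]
          have := ih (-1) 1 (by norm_num) (by norm_num) (fun _ => by norm_num)
          simp only [ite_true, if_neg (by norm_num : (-1 : Int) ≠ 1)] at this
          rcases hk with h | h | h
          · subst h; simpa using this
          · exact absurd h hk1
          · subst h; simpa using this
      · have hs : signKey x = 0 := by simp [signKey, hp, hm]
        simp only [wLoop, if_neg hp, if_neg hm, List.map_cons, hs, runsAux]
        by_cases hk0 : k = 0
        · subst hk0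
          simp only [ite_true]
          have := ih 0 (n + 1) (by norm_num) (by omega) (fun h => absurd rfl h)
          simpa using this
        · rw [if_neg (fun h => hk0 h.symm), findRun]
          have hskip : ¬ (k ≠ 0 ∧ n ≥ 4) := by
            rintro ⟨hk0', hn4⟩; exact absurd (h4 hk0') (by omega)
          rw [if_neg hskip]
          have := ih 0 1 (by norm_num) (by norm_num) (fun h => absurd rfl h)
          simpa using this

-- A's element loop from zeroed counters equals B's run scan
theorem wLoop_eq_findRun (ws : List Int) : wLoop ws 0 0 = findRun (runs (ws.map signKey)) := by
  cases ws with
  | nil => simp [wLoop, runs, findRun]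
  | cons x xs =>
    by_cases hp : x ≥ 8000
    · have hs : signKey x = 1 := by simp [signKey, hp]
      simp only [wLoop, if_pos hp, List.map_cons, hs, runs]
      rw [if_neg (by norm_num)]
      have := wLoop_inv xs 1 1 (by norm_num) (by norm_num) (fun _ => by norm_num)
      simpa using this
    · by_cases hm : x ≤ -8000
      · have hs : signKey x = -1 := by simp [signKey, hp, hm]
        simp only [wLoop, if_neg hp, if_pos hm, List.map_cons, hs, runs]
        rw [if_neg (by norm_num)]
        have := wLoop_inv xs (-1) 1 (by norm_num) (by norm_num) (fun _ => by norm_num)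
        simpa using this
      · have hs : signKey x = 0 := by simp [signKey, hp, hm]
        simp only [wLoop, if_neg hp, if_neg hm, List.map_cons, hs, runs]
        have := wLoop_inv xs 0 1 (by norm_num) (by norm_num) (fun h => absurd rfl h)
        simpa using this

-- ===== VERDICT (by name: the statement is the Claim_ definition above) =====
theorem is_early_match_stable8k_4min_spec : Claim_equal_is_early_match_stable8k_4min := by
  intro match_ _
  unfold Spec_is_early_match_stable8k_4min
  unfold is_early_match_stable8k_4min is_early_match_stable8k_4min_alt
  set leads := (PySem.Dict.mk match_).getD "radiantNetworthLeads" [] with hleads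
  by_cases hg : ((leads.length : Int) < 30 ∨ 50 < (leads.length : Int))
  · rw [if_pos hg, if_pos hg]
  · have h30 : 30 ≤ leads.length := by
      rcases Int.lt_or_le (leads.length : Int) 30 with h | h
      · exact absurd (Or.inl h) hg
      · exact_mod_cast h
    rw [if_neg hg, if_neg hg]
    have hmin : min (30 : Int) (leads.length : Int) = 30 := by omega
    rw [hmin]
    have h15 : ((15 : Nat) : Int) = (15 : Int) := by norm_num
    have := aLoop_range leads 15 15 0 0 (by omega)
    rw [h15] at this
    norm_num at this
    rw [this, wLoop_eq_findRun]
    congr 2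
    rw [PySem.List.slice_toNat leads (by norm_num) (by norm_num)]
    simp
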